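-- pv_equiv track=rewrite | github.com/nucle0tides/Python-Data-Structures | making_anagrams.py | count
-- ===== SOURCE A (Python) =====
-- def count(a, b):
-- 	count = 0
-- 	for k, v in a.items():
-- 		if k in b: # everything in a & b
-- 			count += abs(v - b[k])
-- 		if k not in b: # everything in a
-- 			count += v
-- 	for k, v in b.items():
-- 		if k not in a: # everything in b
-- 			count += v
-- 	return count
-- ===== SOURCE B (Python) =====
-- def count(a, b):
--     sa = sorted(a.items(), key=lambda kv: kv[0])
--     sb = sorted(b.items(), key=lambda kv: kv[0])
--     total = 0
--     i = j = 0
--     while i < len(sa) and j < len(sb):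
--         ka, va = sa[i]
--         kb, vb = sb[j]
--         if ka == kb:
--             total += abs(va - vb)
--             i += 1
--             j += 1
--         elif ka < kb:
--             total += va
--             i += 1
--         else:
--             total += vb
--             j += 1
--     for _, v in sa[i:]:
--         total += v
--     for _, v in sb[j:]:
--         total += v
--     return total
-- ===== Notes on version B (the rewrite author's own statement) =====
-- stated objective: alternative
-- what changed: B sorts both dicts' items by key and computes the total with a single two-pointer sorted merge (abs-difference on equal keys, lone value otherwise, plus remaining tails), instead of A's two dict iterations with membership tests and lookups into the other dict.
import Mathlib
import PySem

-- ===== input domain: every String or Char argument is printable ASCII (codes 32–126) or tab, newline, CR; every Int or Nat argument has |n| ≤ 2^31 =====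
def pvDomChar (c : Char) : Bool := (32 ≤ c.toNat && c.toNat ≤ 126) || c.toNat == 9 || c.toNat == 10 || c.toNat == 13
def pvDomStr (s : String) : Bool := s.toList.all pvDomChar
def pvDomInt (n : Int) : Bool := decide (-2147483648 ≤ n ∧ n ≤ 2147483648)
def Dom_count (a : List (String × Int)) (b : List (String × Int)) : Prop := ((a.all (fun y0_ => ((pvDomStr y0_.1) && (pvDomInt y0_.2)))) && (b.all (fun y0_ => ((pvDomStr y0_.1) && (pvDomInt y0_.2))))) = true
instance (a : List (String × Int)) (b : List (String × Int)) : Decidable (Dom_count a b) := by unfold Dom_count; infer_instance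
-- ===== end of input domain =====

-- B sorts both dicts' items by key and totals with a two-pointer sorted merge instead of A's two dict loops with membership tests (alternative algorithm, same result).

-- ===== PORT A =====
-- two dict loops, each entry tested for membership in the other dict; b[k] / membership = first-match association-list lookup
def count (a : List (String × Int)) (b : List (String × Int)) : Int :=
  let c := a.foldl (fun c kv =>
      let c := if (List.lookup kv.1 b).isSome then c + |kv.2 - (List.lookup kv.1 b).getD 0| else c
      if !(List.lookup kv.1 b).isSome then c + kv.2 else c) 0
  b.foldl (fun c kv => if !(List.lookup kv.1 a).isSome then c + kv.2 else c) c

-- ===== PORT B =====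
-- sort key kv[0]: Python string comparison = lexicographic on code points = List Char order on .toList
def pvKey (kv : String × Int) : List Char := kv.1.toList

-- the while loop with two indices i, j plus the two tail loops, as the standard recursion on the two lists
def pvMerge : List (String × Int) → List (String × Int) → Int
  | [], sb => (sb.map (·.2)).sum
  | (ka, va) :: ta, [] => (((ka, va) :: ta).map (·.2)).sum
  | (ka, va) :: ta, (kb, vb) :: tb =>
    if ka = kb then |va - vb| + pvMerge ta tb
    else if @LT.lt (List Char) List.instLinearOrder.toLT ka.toList kb.toList then
      va + pvMerge ta ((kb, vb) :: tb)
    else vb + pvMerge ((ka, va) :: ta) tb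
termination_by sa sb => sa.length + sb.length

def count_alt (a : List (String × Int)) (b : List (String × Int)) : Int :=
  pvMerge (@PySem.List.sorted _ _ List.instLinearOrder.toLT List.instLinearOrder.toDecidableLT a pvKey false)
          (@PySem.List.sorted _ _ List.instLinearOrder.toLT List.instLinearOrder.toDecidableLT b pvKey false)

-- ===== PRECONDITION & SPEC =====
-- Pre_ restricts the association lists to unique keys: only those represent Python dicts (the arguments' actual type),
-- a duplicate-keyed list is not a value A's Python can receive.
def Pre_count (a : List (String × Int)) (b : List (String × Int)) : Prop :=
  (a.map (·.1)).Nodup ∧ (b.map (·.1)).Nodup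
instance (a : List (String × Int)) (b : List (String × Int)) : Decidable (Pre_count a b) := by unfold Pre_count; infer_instance
def pvWitness_count : (List (String × Int)) × (List (String × Int)) :=
  ([("a", 2), ("b", -1)], [("a", 5), ("c", 3)])
def Spec_count (a : List (String × Int)) (b : List (String × Int)) (out : Int) : Prop := out = count_alt a b
instance (a : List (String × Int)) (b : List (String × Int)) (out : Int) : Decidable (Spec_count a b out) := by unfold Spec_count; infer_instance

-- ===== CLAIM (what is proved, stated in full; the proofs are below) =====
def Claim_equal_count : Prop := ∀ (a : List (String × Int)) (b : List (String × Int)), Dom_count a b → Pre_count a b → Spec_count a b (count a b)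

-- ===== LEMMAS AND PROOFS =====

-- per-entry contribution of A's first loop
def pvGA (b : List (String × Int)) (kv : String × Int) : Int :=
  if (List.lookup kv.1 b).isSome then |kv.2 - (List.lookup kv.1 b).getD 0| else kv.2

-- per-entry contribution of A's second loop
def pvHA (a : List (String × Int)) (kv : String × Int) : Int :=
  if !(List.lookup kv.1 a).isSome then kv.2 else 0

theorem pvFoldA1 (b : List (String × Int)) : ∀ (a : List (String × Int)) (c : Int),
    a.foldl (fun c kv =>
      let c := if (List.lookup kv.1 b).isSome then c + |kv.2 - (List.lookup kv.1 b).getD 0| else c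
      if !(List.lookup kv.1 b).isSome then c + kv.2 else c) c = c + (a.map (pvGA b)).sum := by
  intro a
  induction a with
  | nil => simp
  | cons kv t ih =>
    intro c
    simp only [List.foldl_cons, List.map_cons, List.sum_cons, ih, pvGA]
    cases h : (List.lookup kv.1 b).isSome <;> (simp; try ring)

theorem pvFoldA2 (a : List (String × Int)) : ∀ (b : List (String × Int)) (c : Int),
    b.foldl (fun c kv => if !(List.lookup kv.1 a).isSome then c + kv.2 else c) c
      = c + (b.map (pvHA a)).sum := by
  intro b
  induction b with
  | nil => simp
  | cons kv t ih =>
    intro c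
    simp only [List.foldl_cons, List.map_cons, List.sum_cons, ih, pvHA]
    cases h : (List.lookup kv.1 a).isSome <;> (simp; try ring)

theorem pvLookupConsNe (k : String) (x : String × Int) (t : List (String × Int)) (h : k ≠ x.1) :
    List.lookup k (x :: t) = List.lookup k t := by
  rw [List.lookup, show (k == x.1) = false from beq_eq_false_iff_ne.mpr h]

theorem pvLookupNone (k : String) : ∀ (l : List (String × Int)), (∀ kv ∈ l, kv.1 ≠ k) →
    List.lookup k l = none := by
  intro l
  induction l with
  | nil => intro _; rfl
  | cons x t ih =>
    intro h
    rw [pvLookupConsNe k x t (fun he => h x (List.mem_cons_self ..) he.symm)]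
    exact ih (fun kv hkv => h kv (List.mem_cons_of_mem _ hkv))

theorem pvLookupMem (k : String) (v : Int) : ∀ (l : List (String × Int)),
    List.lookup k l = some v → (k, v) ∈ l := by
  intro l
  induction l with
  | nil => intro h; cases h
  | cons x t ih =>
    intro h
    rw [List.lookup] at h
    cases he : (k == x.1) with
    | true =>
      rw [he] at h
      have : x = (k, v) := by
        cases x; cases h; simp at he ⊢; exact he.symm
      exact this ▸ List.mem_cons_self ..
    | false =>
      rw [he] at h
      exact List.mem_cons_of_mem _ (ih h)

theorem pvLookupSelf : ∀ (a : List (String × Int)), (a.map (·.1)).Nodup →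
    ∀ kv ∈ a, List.lookup kv.1 a = some kv.2 := by
  intro a
  induction a with
  | nil => intro _ kv h; cases h
  | cons x t ih =>
    intro hnd kv hkv
    have hx : x.1 ∉ t.map (·.1) := (List.nodup_cons.mp (by simpa using hnd)).1
    have hnd' : (t.map (·.1)).Nodup := (List.nodup_cons.mp (by simpa using hnd)).2
    rcases List.mem_cons.mp hkv with h | h
    · subst h; simp [List.lookup]
    · have hne : (kv.1 == x.1) = false := by
        simp only [beq_eq_false_iff_ne]
        intro he; exact hx (he ▸ List.mem_map_of_mem h)
      rw [List.lookup, hne]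
      exact ih hnd' kv h

-- lookup in a permutation of a dict (unique keys) gives the same result
theorem pvLookupPerm (l l' : List (String × Int)) (hp : l'.Perm l)
    (hnd : (l.map (·.1)).Nodup) (k : String) : List.lookup k l' = List.lookup k l := by
  have hnd' : (l'.map (·.1)).Nodup := ((hp.map (·.1)).nodup_iff).mpr hnd
  cases h : List.lookup k l with
  | none =>
    refine pvLookupNone k l' (fun kv hkv he => ?_)
    have : List.lookup k l = some kv.2 := by
      have := pvLookupSelf l hnd kv (hp.mem_iff.mp hkv)
      rwa [he] at this
    rw [h] at this; cases this
  | some v =>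
    have hm : (k, v) ∈ l' := hp.mem_iff.mpr (pvLookupMem k v l h)
    have := pvLookupSelf l' hnd' (k, v) hm
    exact this

-- strict order on entry keys, in the instance the ports use
def pvKLt (p q : String × Int) : Prop := @LT.lt (List Char) List.instLinearOrder.toLT (pvKey p) (pvKey q)

-- sorted items of a unique-keyed dict have strictly increasing keys
theorem pvSortedLt (l : List (String × Int)) (hnd : (l.map (·.1)).Nodup) :
    (@PySem.List.sorted _ _ List.instLinearOrder.toLT List.instLinearOrder.toDecidableLT l pvKey false).Pairwise pvKLt := by
  have hle := @PySem.List.sorted_pairwise _ _ List.instLinearOrder l pvKey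
  have hnd' : ((@PySem.List.sorted _ _ List.instLinearOrder.toLT List.instLinearOrder.toDecidableLT l pvKey false).map (·.1)).Nodup :=
    (((@PySem.List.sorted_perm _ _ List.instLinearOrder.toLT List.instLinearOrder.toDecidableLT l pvKey false).map (·.1)).nodup_iff).mpr hnd
  have hne := List.pairwise_map.mp hnd'
  exact (hle.and hne).imp (fun h => lt_of_le_of_ne h.1
    (fun he => h.2 (String.toList_inj.mp he)))

theorem pvKLtNe {p q : String × Int} (h : pvKLt p q) : p.1 ≠ q.1 := by
  intro he
  exact absurd (show pvKey p = pvKey q from congrArg String.toList he) (ne_of_lt h)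

-- the two-pointer merge over strictly key-sorted lists computes A's two loop sums
theorem pvMergeEq : ∀ (sa sb : List (String × Int)),
    sa.Pairwise pvKLt → sb.Pairwise pvKLt →
    pvMerge sa sb = (sa.map (pvGA sb)).sum + (sb.map (pvHA sa)).sum := by
  intro sa sb
  induction sa, sb using pvMerge.induct with
  | case1 sb =>
    intro _ _
    rw [pvMerge]
    rw [List.map_congr_left (fun kv _ => show pvHA [] kv = kv.2 by rw [pvHA]; rfl)]
    simp
  | case2 ka va ta =>
    intro _ _
    rw [pvMerge]
    rw [List.map_congr_left (l := (ka, va) :: ta)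
      (fun kv _ => show pvGA [] kv = kv.2 by rw [pvGA]; rfl)]
    simp
  | case3 va ta kb vb tb ih =>
    intro hpa hpb
    obtain ⟨hha, hta⟩ := List.pairwise_cons.mp hpa
    obtain ⟨hhb, htb⟩ := List.pairwise_cons.mp hpb
    rw [pvMerge, if_pos rfl, ih hta htb]
    have e1 : pvGA ((kb, vb) :: tb) (kb, va) = |va - vb| := by
      rw [pvGA]; simp [List.lookup]
    have e2 : ta.map (pvGA ((kb, vb) :: tb)) = ta.map (pvGA tb) := by
      refine List.map_congr_left (fun kv hkv => ?_)
      rw [pvGA, pvGA, pvLookupConsNe kv.1 (kb, vb) tb (pvKLtNe (hha kv hkv)).symm]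
    have e3 : pvHA ((kb, va) :: ta) (kb, vb) = 0 := by
      rw [pvHA]; simp [List.lookup]
    have e4 : tb.map (pvHA ((kb, va) :: ta)) = tb.map (pvHA ta) := by
      refine List.map_congr_left (fun kv hkv => ?_)
      rw [pvHA, pvHA, pvLookupConsNe kv.1 (kb, va) ta (pvKLtNe (hhb kv hkv)).symm]
    simp only [List.map_cons, List.sum_cons]
    rw [e1, e2, e3, e4]
    ring
  | case4 ka va ta kb vb tb heq hlt ih =>
    intro hpa hpb
    obtain ⟨hha, hta⟩ := List.pairwise_cons.mp hpa
    obtain ⟨hhb, htb⟩ := List.pairwise_cons.mp hpb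
    have hbig : ∀ kv ∈ (kb, vb) :: tb, pvKLt (ka, va) kv := by
      intro kv hkv
      rcases List.mem_cons.mp hkv with h | h
      · subst h; exact hlt
      · exact lt_trans hlt (hhb kv h)
    rw [pvMerge, if_neg heq, if_pos hlt, ih hta hpb]
    have e1 : pvGA ((kb, vb) :: tb) (ka, va) = va := by
      rw [pvGA, pvLookupNone ka ((kb, vb) :: tb)
        (fun kv hkv => (pvKLtNe (hbig kv hkv)).symm)]
      rfl
    have e3 : pvHA ((ka, va) :: ta) (kb, vb) = pvHA ta (kb, vb) := by
      rw [pvHA, pvHA, pvLookupConsNe kb (ka, va) ta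
        (pvKLtNe (hbig (kb, vb) (List.mem_cons_self ..))).symm]
    have e4 : tb.map (pvHA ((ka, va) :: ta)) = tb.map (pvHA ta) := by
      refine List.map_congr_left (fun kv hkv => ?_)
      rw [pvHA, pvHA, pvLookupConsNe kv.1 (ka, va) ta
        (pvKLtNe (hbig kv (List.mem_cons_of_mem _ hkv))).symm]
    simp only [List.map_cons, List.sum_cons]
    rw [e1, e3, e4]
    ring
  | case5 ka va ta kb vb tb heq hnlt ih =>
    intro hpa hpb
    obtain ⟨hha, hta⟩ := List.pairwise_cons.mp hpa
    obtain ⟨hhb, htb⟩ := List.pairwise_cons.mp hpb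
    have hlt : pvKLt (kb, vb) (ka, va) := by
      rcases lt_trichotomy (pvKey (kb, vb)) (pvKey (ka, va)) with h | h | h
      · exact h
      · exact absurd (String.toList_inj.mp h.symm) heq
      · exact absurd h hnlt
    have hbig : ∀ kv ∈ (ka, va) :: ta, pvKLt (kb, vb) kv := by
      intro kv hkv
      rcases List.mem_cons.mp hkv with h | h
      · subst h; exact hlt
      · exact lt_trans hlt (hha kv h)
    rw [pvMerge, if_neg heq, if_neg hnlt, ih hpa htb]
    have e1 : pvGA ((kb, vb) :: tb) (ka, va) = pvGA tb (ka, va) := by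
      rw [pvGA, pvGA, pvLookupConsNe ka (kb, vb) tb
        (pvKLtNe (hbig (ka, va) (List.mem_cons_self ..))).symm]
    have e2 : ta.map (pvGA ((kb, vb) :: tb)) = ta.map (pvGA tb) := by
      refine List.map_congr_left (fun kv hkv => ?_)
      rw [pvGA, pvGA, pvLookupConsNe kv.1 (kb, vb) tb
        (pvKLtNe (hbig kv (List.mem_cons_of_mem _ hkv))).symm]
    have e3 : pvHA ((ka, va) :: ta) (kb, vb) = vb := by
      rw [pvHA, pvLookupNone kb ((ka, va) :: ta)
        (fun kv hkv => (pvKLtNe (hbig kv hkv)).symm)]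
      rfl
    simp only [List.map_cons, List.sum_cons]
    rw [e1, e2, e3]
    ring

-- ===== VERDICT (by name: the statement is the Claim_ definition above) =====
theorem count_spec : Claim_equal_count := by
  intro a b _ hpre
  obtain ⟨ha, hb⟩ := hpre
  show count a b = count_alt a b
  have hpa := @PySem.List.sorted_perm _ _ List.instLinearOrder.toLT List.instLinearOrder.toDecidableLT a pvKey false
  have hpb := @PySem.List.sorted_perm _ _ List.instLinearOrder.toLT List.instLinearOrder.toDecidableLT b pvKey false
  unfold count count_alt
  rw [pvFoldA1, pvFoldA2, pvMergeEq _ _ (pvSortedLt a ha) (pvSortedLt b hb)]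
  have ega : ∀ kv, pvGA (@PySem.List.sorted _ _ List.instLinearOrder.toLT List.instLinearOrder.toDecidableLT b pvKey false) kv = pvGA b kv := by
    intro kv; rw [pvGA, pvGA, pvLookupPerm b _ hpb hb kv.1]
  have eha : ∀ kv, pvHA (@PySem.List.sorted _ _ List.instLinearOrder.toLT List.instLinearOrder.toDecidableLT a pvKey false) kv = pvHA a kv := by
    intro kv; rw [pvHA, pvHA, pvLookupPerm a _ hpa ha kv.1]
  rw [List.map_congr_left (fun kv _ => ega kv), List.map_congr_left (fun kv _ => eha kv)]
  rw [(hpa.map (pvGA b)).sum_eq, (hpb.map (pvHA a)).sum_eq]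
  ring
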